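-- pv_equiv track=rewrite | github.com/godfreydekew/v-vet | backend/app/services/whatsapp.py | detect_sync_command
-- ===== SOURCE A (Python) =====
-- def detect_sync_command(message_body: str) -> tuple[str, str] | None:
--     """
--     Return (email, password) if the message is a sync command, else None.
--
--     Accepted formats:
--       sync email@example.com mypassword
--       link email@example.com mypassword
--     """
--     text = message_body.strip()
--     lower = text.lower()
--     for prefix in ("sync ", "link "):
--         if lower.startswith(prefix):
--             parts = text[len(prefix):].strip().split(None, 1)
--             if len(parts) == 2:
--                 return parts[0], parts[1]
--     return None
-- ===== SOURCE B (Python) =====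
-- import re
--
-- # One anchored regex: case-insensitive keyword + literal space, then
-- # email and password captured directly (DOTALL so newlines stay in the password).
-- _SYNC_RE = re.compile(r"(?is)(?:sync|link) \s*(\S+)\s+(\S.*)")
--
-- def detect_sync_command(message_body: str) -> tuple[str, str] | None:
--     """Return (email, password) if the message is a sync/link command, else None."""
--     m = _SYNC_RE.match(message_body.strip())
--     return (m.group(1), m.group(2)) if m else None
-- ===== Notes on version B (the rewrite author's own statement) =====
-- stated objective: idiomatic
-- what changed: Replaces the per-prefix loop with startswith, slicing, re-strip and split(None,1) by a single anchored case-insensitive regex that captures email and password in one match.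
import Mathlib
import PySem

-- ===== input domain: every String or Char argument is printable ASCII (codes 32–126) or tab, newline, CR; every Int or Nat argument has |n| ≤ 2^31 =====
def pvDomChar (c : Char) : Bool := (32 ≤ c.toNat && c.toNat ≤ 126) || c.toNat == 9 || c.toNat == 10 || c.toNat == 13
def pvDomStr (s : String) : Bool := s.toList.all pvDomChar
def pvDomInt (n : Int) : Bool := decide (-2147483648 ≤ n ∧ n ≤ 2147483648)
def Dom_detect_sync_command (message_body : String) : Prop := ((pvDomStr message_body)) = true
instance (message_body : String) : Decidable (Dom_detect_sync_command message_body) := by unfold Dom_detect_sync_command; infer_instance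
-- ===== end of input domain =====

-- B replaces A's per-prefix loop (startswith + slice + re-strip + split(None,1)) by one
-- anchored case-insensitive regex capturing email and password in a single match
-- (objective: idiomatic).

-- ===== PORT A =====
-- the 'for prefix in ("sync ", "link ")' loop of A, structural recursion over the prefix list
def pvDetectLoop (text lowerT : String) : List String → Option (String × String)
  | [] => none
  | p :: ps =>
      if PySem.Str.startswith lowerT p then
        let parts := PySem.Str.split₀Max
          (PySem.Str.strip (PySem.Str.slice text (some (PySem.Str.len p)) none)) 1
        if parts.length = 2 then
          some (PySem.List.pyGetD parts 0 "", PySem.List.pyGetD parts 1 "")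
        else pvDetectLoop text lowerT ps
      else pvDetectLoop text lowerT ps

def detect_sync_command (message_body : String) : Option (String × String) :=
  let text := PySem.Str.strip message_body
  let lowerT := PySem.Str.lower text
  pvDetectLoop text lowerT ["sync ", "link "]

-- ===== PORT B =====
-- Source B matches the stripped text against re.compile(r"(?is)(?:sync|link) \s*(\S+)\s+(\S.*)").
-- Python's re module has no PySem counterpart, so the regex is ported by hand, piece by
-- piece in pattern order (exact on Dom, where \s coincides with PySem.Chars.isspace and
-- DOTALL lets '.' match '\n'):
--   (?i)(?:sync|link)' '  = lowered 5-char prefix test;   \s*   = dropWhile isspace;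
--   (\S+)  = nonempty maximal run of non-space (group 1);
--   \s+(\S.*)  = the rest after the following whitespace run, nonempty, captured
--                greedily to the end of the string (group 2).
def detect_sync_command_alt (message_body : String) : Option (String × String) :=
  let t := PySem.Chars.strip message_body.toList
  if PySem.Chars.lower (t.take 5) = "sync ".toList ∨ PySem.Chars.lower (t.take 5) = "link ".toList then
    let r1 := (t.drop 5).dropWhile PySem.Chars.isspace
    let email := r1.takeWhile (fun c => !PySem.Chars.isspace c)
    let pw := (r1.dropWhile (fun c => !PySem.Chars.isspace c)).dropWhile PySem.Chars.isspace
    if email ≠ [] ∧ pw ≠ [] then some (String.ofList email, String.ofList pw)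
    else none
  else none

-- ===== PRECONDITION & SPEC =====
def Spec_detect_sync_command (message_body : String) (out : Option (String × String)) : Prop := out = detect_sync_command_alt message_body
instance (message_body : String) (out : Option (String × String)) : Decidable (Spec_detect_sync_command message_body out) := by unfold Spec_detect_sync_command; infer_instance

-- ===== CLAIM (what is proved, stated in full; the proofs are below) =====
def Claim_equal_detect_sync_command : Prop := ∀ (message_body : String), Dom_detect_sync_command message_body → Spec_detect_sync_command message_body (detect_sync_command message_body)

-- ===== LEMMAS AND PROOFS =====

lemma pv_map_toList_one {P : List String} {a : List Char}
    (h : P.map String.toList = [a]) : P = [String.ofList a] := by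
  cases P with
  | nil => simp at h
  | cons x xs =>
    cases xs <;> simp_all
    rw [← h]; exact String.ofList_toList.symm

lemma pv_map_toList_two {P : List String} {a b : List Char}
    (h : P.map String.toList = [a, b]) : P = [String.ofList a, String.ofList b] := by
  cases P with
  | nil => simp at h
  | cons x xs =>
    cases xs with
    | nil => simp at h
    | cons y ys =>
      cases ys <;> simp_all
      constructor
      · rw [← h.1]; exact String.ofList_toList.symm
      · rw [← h.2]; exact String.ofList_toList.symm

lemma pv_map_toList_nil {P : List String} (h : P.map String.toList = []) : P = [] := by
  cases P <;> simp_all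

lemma pv_startswith_lower (t p : List Char) :
    PySem.Chars.startswith (PySem.Chars.lower t) p = decide (PySem.Chars.lower (t.take p.length) = p) := by
  rw [Bool.eq_iff_iff, PySem.Chars.startswith_iff, decide_eq_true_iff]
  rw [List.prefix_iff_eq_take, PySem.Chars.lower, PySem.Chars.lower, List.map_take]
  constructor <;> (intro h; exact h.symm)

lemma pv_prefix_dropWhile {p : Char → Bool} {l v : List Char}
    (h : v <+: List.dropWhile p l) : List.dropWhile p v = v := by
  rw [List.prefix_iff_eq_take] at h
  rw [h, List.dropWhile_eq_self_iff]
  intro hl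
  have hlen : (List.take v.length (List.dropWhile p l)).length ≤ (List.dropWhile p l).length := by
    simp
  have h0 : (List.take v.length (List.dropWhile p l))[0] = (List.dropWhile p l)[0]'(by omega) := by
    simp [List.getElem_take]
  rw [h0]
  exact List.dropWhile_eq_self_iff.mp (List.dropWhile_idempotent _ _) _

lemma pv_rstrip_suffix {x v : List Char} (h : v <:+ PySem.Chars.strip x) :
    PySem.Chars.rstrip v = v := by
  rw [PySem.Chars.rstrip]
  have hrev : v.reverse <+: (PySem.Chars.strip x).reverse := List.reverse_prefix.mpr h
  have hx : (PySem.Chars.strip x).reverse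
      = List.dropWhile PySem.Chars.isspace (PySem.Chars.lstrip x).reverse := by
    rw [PySem.Chars.strip, PySem.Chars.rstrip, List.reverse_reverse]
  rw [hx] at hrev
  rw [pv_prefix_dropWhile hrev, List.reverse_reverse]

-- stripping a tail of an already-stripped string only removes leading whitespace
lemma pv_strip_drop (x : List Char) (n : ℕ) :
    PySem.Chars.strip ((PySem.Chars.strip x).drop n) =
    List.dropWhile PySem.Chars.isspace ((PySem.Chars.strip x).drop n) := by
  have hsuf : List.dropWhile PySem.Chars.isspace ((PySem.Chars.strip x).drop n)
      <:+ PySem.Chars.strip x :=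
    (List.dropWhile_suffix _).trans (List.drop_suffix _ _)
  rw [PySem.Chars.strip, PySem.Chars.lstrip]
  exact pv_rstrip_suffix hsuf

lemma pv_split₀Max_one (l : List Char) (h : List.dropWhile PySem.Chars.isspace l = l) :
    PySem.Chars.split₀Max l 1 =
      if l = [] then []
      else if (List.dropWhile PySem.Chars.isspace
                (List.dropWhile (fun c => !PySem.Chars.isspace c) l)) = [] then
        [List.takeWhile (fun c => !PySem.Chars.isspace c) l]
      else
        [List.takeWhile (fun c => !PySem.Chars.isspace c) l,
         List.dropWhile PySem.Chars.isspace (List.dropWhile (fun c => !PySem.Chars.isspace c) l)] := by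
  rw [PySem.Chars.split₀Max]
  norm_num
  cases l with
  | nil =>
    simp [PySem.Chars.split₀Max.go]
  | cons c cs =>
    rw [List.length_cons]
    rw [PySem.Chars.split₀Max.go.eq_def]
    simp only []
    rw [h]
    show PySem.Chars.split₀Max.go (cs.length + 1) 0
        (List.dropWhile (fun c => !PySem.Chars.isspace c) (c :: cs))
        [List.takeWhile (fun c => !PySem.Chars.isspace c) (c :: cs)] = _
    rw [PySem.Chars.split₀Max.go.eq_def]
    rcases hrem : List.dropWhile PySem.Chars.isspace (List.dropWhile (fun c => !PySem.Chars.isspace c) (c :: cs)) with _ | ⟨d, ds⟩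
    · have hall : ∀ x ∈ List.dropWhile (fun c => !PySem.Chars.isspace c) (c :: cs), PySem.Chars.isspace x = true := by
        rw [← List.dropWhile_eq_nil_iff]; exact hrem
      simp only [hrem]
      show [List.takeWhile (fun c => !PySem.Chars.isspace c) (c :: cs)].reverse = _
      rw [if_neg (by simp), if_pos hall]
      simp
    · have hidem : List.dropWhile PySem.Chars.isspace (d :: ds) = d :: ds := by
        rw [← hrem]; exact List.dropWhile_idempotent _ _
      have hd : PySem.Chars.isspace d = false := by
        have := List.dropWhile_eq_self_iff.mp hidem (by simp)
        simpa using this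
      have hmem : d ∈ List.dropWhile (fun c => !PySem.Chars.isspace c) (c :: cs) := by
        have hsuf := List.dropWhile_suffix (l := List.dropWhile (fun c => !PySem.Chars.isspace c) (c :: cs)) PySem.Chars.isspace
        rw [hrem] at hsuf
        exact hsuf.subset (by simp)
      simp only [hrem]
      show ((d :: ds) :: [List.takeWhile (fun c => !PySem.Chars.isspace c) (c :: cs)]).reverse = _
      rw [if_neg (by simp : ¬(c :: cs = [])), if_neg (fun hall => by simpa [hd] using hall d hmem)]
      simp

lemma pv_branch (PartsS : List String) (R : List Char)
    (hstrip : List.dropWhile PySem.Chars.isspace R = R)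
    (hmap : PartsS.map String.toList = PySem.Chars.split₀Max R 1) :
    (if PartsS.length = 2 then
       some (PySem.List.pyGetD PartsS 0 "", PySem.List.pyGetD PartsS 1 "")
     else none)
    = (if R.takeWhile (fun c => !PySem.Chars.isspace c) ≠ [] ∧
          (R.dropWhile (fun c => !PySem.Chars.isspace c)).dropWhile PySem.Chars.isspace ≠ [] then
         some (String.ofList (R.takeWhile (fun c => !PySem.Chars.isspace c)),
               String.ofList ((R.dropWhile (fun c => !PySem.Chars.isspace c)).dropWhile PySem.Chars.isspace))
       else none) := by
  rw [pv_split₀Max_one R hstrip] at hmap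
  rcases hR : R with _ | ⟨c, cs⟩
  · subst hR
    rw [if_pos rfl] at hmap
    rw [pv_map_toList_nil hmap]
    simp
  · have hc : PySem.Chars.isspace c = false := by
      have := List.dropWhile_eq_self_iff.mp (hR ▸ hstrip) (by simp)
      simpa using this
    have hemail : (c :: cs).takeWhile (fun c => !PySem.Chars.isspace c) ≠ [] := by
      simp [hc]
    subst hR
    rw [if_neg (by simp)] at hmap
    by_cases hrem : (List.dropWhile (fun c => !PySem.Chars.isspace c) (c :: cs)).dropWhile PySem.Chars.isspace = []
    · rw [if_pos hrem] at hmap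
      rw [pv_map_toList_one hmap]
      simp [hrem]
    · rw [if_neg hrem] at hmap
      rw [pv_map_toList_two hmap]
      simp [PySem.List.pyGetD, hemail, hrem]

theorem pv_main (m : String) : detect_sync_command m = detect_sync_command_alt m := by
  unfold detect_sync_command detect_sync_command_alt
  simp only [pvDetectLoop]
  have hsync : PySem.Str.startswith (PySem.Str.lower (PySem.Str.strip m)) "sync "
      = decide (PySem.Chars.lower ((PySem.Chars.strip m.toList).take 5) = "sync ".toList) := by
    rw [PySem.Str.startswith_eq, PySem.Str.toList_lower, PySem.Str.toList_strip,
        pv_startswith_lower, show "sync ".toList.length = 5 from by decide]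
  have hlink : PySem.Str.startswith (PySem.Str.lower (PySem.Str.strip m)) "link "
      = decide (PySem.Chars.lower ((PySem.Chars.strip m.toList).take 5) = "link ".toList) := by
    rw [PySem.Str.startswith_eq, PySem.Str.toList_lower, PySem.Str.toList_strip,
        pv_startswith_lower, show "link ".toList.length = 5 from by decide]
  have hRs : (PySem.Str.strip (PySem.Str.slice (PySem.Str.strip m) (some (PySem.Str.len "sync ")) none)).toList
      = PySem.Chars.strip ((PySem.Chars.strip m.toList).drop 5) := by
    rw [show PySem.Str.len "sync " = ((5:ℕ):ℤ) by decide]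
    rw [PySem.Str.toList_strip, PySem.Str.toList_slice, PySem.Chars.slice_eq_listSlice,
        PySem.List.slice_from_natCast, PySem.Str.toList_strip]
  replace hRs := hRs.trans (pv_strip_drop m.toList 5)
  have hRl : (PySem.Str.strip (PySem.Str.slice (PySem.Str.strip m) (some (PySem.Str.len "link ")) none)).toList
      = PySem.Chars.strip ((PySem.Chars.strip m.toList).drop 5) := by
    rw [show PySem.Str.len "link " = ((5:ℕ):ℤ) by decide]
    rw [PySem.Str.toList_strip, PySem.Str.toList_slice, PySem.Chars.slice_eq_listSlice,
        PySem.List.slice_from_natCast, PySem.Str.toList_strip]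
  replace hRl := hRl.trans (pv_strip_drop m.toList 5)
  have hstripR : List.dropWhile PySem.Chars.isspace
      (List.dropWhile PySem.Chars.isspace ((PySem.Chars.strip m.toList).drop 5))
      = List.dropWhile PySem.Chars.isspace ((PySem.Chars.strip m.toList).drop 5) :=
    List.dropWhile_idempotent _ _
  by_cases h1 : PySem.Chars.lower ((PySem.Chars.strip m.toList).take 5) = "sync ".toList
  · have h2 : ¬ PySem.Chars.lower ((PySem.Chars.strip m.toList).take 5) = "link ".toList := by
      rw [h1]; decide
    simp only [hsync, hlink, decide_eq_true_eq]
    rw [if_pos h1, if_neg h2]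
    conv_rhs => rw [if_pos (Or.inl h1)]
    exact pv_branch _ _ hstripR (by rw [PySem.Str.split₀Max_map_toList, hRs])
  · by_cases h2 : PySem.Chars.lower ((PySem.Chars.strip m.toList).take 5) = "link ".toList
    · simp only [hsync, hlink, decide_eq_true_eq]
      rw [if_neg h1, if_pos h2]
      conv_rhs => rw [if_pos (Or.inr h2)]
      exact pv_branch _ _ hstripR (by rw [PySem.Str.split₀Max_map_toList, hRl])
    · simp only [hsync, hlink, decide_eq_true_eq]
      rw [if_neg h1, if_neg h2, if_neg (fun hor => hor.elim h1 h2)]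

-- ===== VERDICT (by name: the statement is the Claim_ definition above) =====
theorem detect_sync_command_spec : Claim_equal_detect_sync_command := by
  intro m _
  unfold Spec_detect_sync_command
  exact pv_main m
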